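-- pv_equiv track=rewrite | github.com/MQFacultyOfArts/PromptGrimoireTool | spike_two_pass.py | _collapsed_to_html_offset
-- ===== SOURCE A (Python) =====
-- def _collapsed_to_html_offset(
--     html_text: str, decoded_text: str, collapsed_offset: int
-- ) -> int:
--     """Map an offset in collapsed-decoded text to an offset in HTML-encoded text.
--
--     Walks the decoded text (which has entities resolved, e.g. "&" not "&amp;")
--     applying whitespace collapsing. Simultaneously advances through the HTML
--     text to track the corresponding byte position.
--
--     The HTML text may contain entities like &amp; &lt; &gt; &nbsp; which are
--     multi-byte in HTML but single-char in decoded text.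
--     """
--     if collapsed_offset == 0:
--         return 0
--
--     collapsed_pos = 0
--     decoded_pos = 0
--     html_pos = 0
--     in_whitespace = False
--
--     while decoded_pos < len(decoded_text) and collapsed_pos < collapsed_offset:
--         ch = decoded_text[decoded_pos]
--         is_ws = ch in (" ", "\t", "\n", "\r", "\u00a0") or ch.isspace()
--
--         # Figure out how many HTML bytes this decoded char takes
--         html_char_len = _html_char_length(html_text, html_pos, ch)
--
--         if is_ws:
--             if not in_whitespace:
--                 collapsed_pos += 1
--                 in_whitespace = True
--             html_pos += html_char_len
--             decoded_pos += 1
--         else: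
--             collapsed_pos += 1
--             html_pos += html_char_len
--             decoded_pos += 1
--             in_whitespace = False
--
--     return html_pos
--
-- _ENTITY_MAP = {
--     "&amp;": "&",
--     "&lt;": "<",
--     "&gt;": ">",
--     "&quot;": '"',
--     "&apos;": "'",
--     "&nbsp;": "\u00a0",
-- }
--
-- def _html_char_length(html_text: str, html_pos: int, decoded_char: str) -> int:
--     """Determine how many bytes in html_text correspond to one decoded char.
--
--     If html_text[html_pos] starts an entity (e.g. &amp;), return the entity
--     length. Otherwise return 1.
--     """
--     if html_pos >= len(html_text):
--         return 1
--
--     if html_text[html_pos] == "&":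
--         # Try to match a known entity
--         for entity, decoded in _ENTITY_MAP.items():
--             if html_text[html_pos:].startswith(entity) and decoded == decoded_char:
--                 return len(entity)
--         # Try numeric entity &#NNN; or &#xHHH;
--         semicolon = html_text.find(";", html_pos + 1)
--         if semicolon != -1 and semicolon - html_pos < 12:
--             return semicolon - html_pos + 1
--     return 1
-- ===== SOURCE B (Python) =====
-- _ENTITY_MAP = {
--     "&amp;": "&",
--     "&lt;": "<",
--     "&gt;": ">",
--     "&quot;": '"',
--     "&apos;": "'",
--     "&nbsp;": "\u00a0",
-- }
--
--
-- def _html_char_length(html_text: str, html_pos: int, decoded_char: str) -> int: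
--     """How many chars in html_text correspond to one decoded char."""
--     if html_pos >= len(html_text):
--         return 1
--     if html_text[html_pos] == "&":
--         for entity, decoded in _ENTITY_MAP.items():
--             if html_text[html_pos:].startswith(entity) and decoded == decoded_char:
--                 return len(entity)
--         semicolon = html_text.find(";", html_pos + 1)
--         if semicolon != -1 and semicolon - html_pos < 12:
--             return semicolon - html_pos + 1
--     return 1
--
--
-- def _collapsed_to_html_offset(html_text: str, decoded_text: str, collapsed_offset: int) -> int:
--     if collapsed_offset == 0:
--         return 0
--     # Pass 1: pure whitespace-collapse state machine; count decoded chars consumed.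
--     consumed = 0
--     collapsed_pos = 0
--     in_whitespace = False
--     for ch in decoded_text:
--         if collapsed_pos >= collapsed_offset:
--             break
--         is_ws = ch in (" ", "\t", "\n", "\r", "\u00a0") or ch.isspace()
--         if is_ws:
--             if not in_whitespace:
--                 collapsed_pos += 1
--             in_whitespace = True
--         else:
--             collapsed_pos += 1
--             in_whitespace = False
--         consumed += 1
--     # Pass 2: sum the HTML lengths of exactly that decoded prefix.
--     html_pos = 0
--     for ch in decoded_text[:consumed]:
--         html_pos += _html_char_length(html_text, html_pos, ch)
--     return html_pos
-- ===== Notes on version B (the rewrite author's own statement) =====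
-- stated objective: alternative
-- what changed: Splits A's single interleaved loop into two independent passes: a pure whitespace-collapse state machine that only counts how many decoded chars are consumed, followed by a separate fold summing the HTML entity lengths over exactly that prefix.
import Mathlib
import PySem

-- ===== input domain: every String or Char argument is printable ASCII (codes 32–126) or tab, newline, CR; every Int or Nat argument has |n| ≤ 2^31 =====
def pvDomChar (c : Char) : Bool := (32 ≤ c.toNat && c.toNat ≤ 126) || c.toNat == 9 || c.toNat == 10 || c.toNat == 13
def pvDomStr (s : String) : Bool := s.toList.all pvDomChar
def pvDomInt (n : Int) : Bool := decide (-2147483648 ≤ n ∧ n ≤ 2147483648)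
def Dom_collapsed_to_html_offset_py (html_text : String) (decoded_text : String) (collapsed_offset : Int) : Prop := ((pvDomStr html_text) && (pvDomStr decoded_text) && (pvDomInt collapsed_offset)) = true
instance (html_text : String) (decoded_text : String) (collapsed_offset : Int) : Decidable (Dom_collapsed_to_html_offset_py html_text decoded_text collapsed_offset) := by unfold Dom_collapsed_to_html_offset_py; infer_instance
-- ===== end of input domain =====

-- B restructures A's single interleaved loop into two independent passes (count consumed
-- decoded chars, then sum HTML lengths over that prefix); same results, similar cost.

-- ===== PORT A =====

-- shared helper: port of _html_char_length (used verbatim by both Pythons)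
def pvIsWs (ch : Char) : Bool :=
  (ch == ' ' || ch == '\t' || ch == '\n' || ch == '\r' || ch == '\u00A0') || PySem.Chars.isspace ch

def pvHtmlCharLength (html : List Char) (html_pos : Int) (decoded_char : Char) : Int :=
  if html_pos ≥ (html.length : Int) then 1
  else if PySem.List.pyGet? html html_pos = some '&' then
    let rest := PySem.List.slice html (some html_pos) none
    if PySem.Chars.startswith rest "&amp;".toList && (decoded_char == '&') then 5
    else if PySem.Chars.startswith rest "&lt;".toList && (decoded_char == '<') then 4
    else if PySem.Chars.startswith rest "&gt;".toList && (decoded_char == '>') then 4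
    else if PySem.Chars.startswith rest "&quot;".toList && (decoded_char == '"') then 6
    else if PySem.Chars.startswith rest "&apos;".toList && (decoded_char == '\'') then 6
    else if PySem.Chars.startswith rest "&nbsp;".toList && (decoded_char == '\u00A0') then 6
    else
      let semicolon := PySem.Chars.findFrom html [';'] (html_pos + 1) none
      if semicolon ≠ -1 && semicolon - html_pos < 12 then semicolon - html_pos + 1
      else 1
  else 1

-- A's while-loop, one recursive step per decoded char, state (html_pos, collapsed_pos, in_whitespace)
def pvLoopA (html : List Char) (offset : Int) : List Char → Int → Int → Bool → Int
  | [], html_pos, _, _ => html_pos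
  | ch :: rest, html_pos, collapsed_pos, in_ws =>
    if collapsed_pos < offset then
      let l := pvHtmlCharLength html html_pos ch
      if pvIsWs ch then
        if in_ws then pvLoopA html offset rest (html_pos + l) collapsed_pos true
        else pvLoopA html offset rest (html_pos + l) (collapsed_pos + 1) true
      else pvLoopA html offset rest (html_pos + l) (collapsed_pos + 1) false
    else html_pos

def collapsed_to_html_offset_py (html_text : String) (decoded_text : String) (collapsed_offset : Int) : Int :=
  if collapsed_offset = 0 then 0
  else pvLoopA html_text.toList collapsed_offset decoded_text.toList 0 0 false

-- ===== PORT B =====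

-- pass 1: pure collapse state machine, counting consumed decoded chars
def pvCountB (offset : Int) : List Char → Int → Bool → Nat
  | [], _, _ => 0
  | ch :: rest, collapsed_pos, in_ws =>
    if collapsed_pos ≥ offset then 0
    else if pvIsWs ch then
      1 + pvCountB offset rest (if in_ws then collapsed_pos else collapsed_pos + 1) true
    else
      1 + pvCountB offset rest (collapsed_pos + 1) false

-- pass 2: sum HTML lengths over a decoded prefix
def pvSumB (html : List Char) : List Char → Int → Int
  | [], html_pos => html_pos
  | ch :: rest, html_pos => pvSumB html rest (html_pos + pvHtmlCharLength html html_pos ch)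

def collapsed_to_html_offset_py_alt (html_text : String) (decoded_text : String) (collapsed_offset : Int) : Int :=
  if collapsed_offset = 0 then 0
  else
    let consumed := pvCountB collapsed_offset decoded_text.toList 0 false
    pvSumB html_text.toList (decoded_text.toList.take consumed) 0

-- ===== PRECONDITION & SPEC =====
def Spec_collapsed_to_html_offset_py (html_text : String) (decoded_text : String) (collapsed_offset : Int) (out : Int) : Prop := out = collapsed_to_html_offset_py_alt html_text decoded_text collapsed_offset
instance (html_text : String) (decoded_text : String) (collapsed_offset : Int) (out : Int) : Decidable (Spec_collapsed_to_html_offset_py html_text decoded_text collapsed_offset out) := by unfold Spec_collapsed_to_html_offset_py; infer_instance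

-- ===== CLAIM (what is proved, stated in full; the proofs are below) =====
def Claim_equal_collapsed_to_html_offset_py : Prop := ∀ (html_text : String) (decoded_text : String) (collapsed_offset : Int), Dom_collapsed_to_html_offset_py html_text decoded_text collapsed_offset → Spec_collapsed_to_html_offset_py html_text decoded_text collapsed_offset (collapsed_to_html_offset_py html_text decoded_text collapsed_offset)

-- ===== LEMMAS AND PROOFS =====

-- A's fused loop from any state equals: count with the collapse machine, then sum over that prefix.
theorem pvLoopA_eq (html : List Char) (offset : Int) :
    ∀ (chs : List Char) (hp cp : Int) (iw : Bool),
      pvLoopA html offset chs hp cp iw =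
        pvSumB html (chs.take (pvCountB offset chs cp iw)) hp := by
  intro chs
  induction chs with
  | nil => intro hp cp iw; simp [pvLoopA, pvCountB, pvSumB]
  | cons ch rest ih =>
    intro hp cp iw
    by_cases hlt : cp < offset
    · have hge : ¬ cp ≥ offset := by omega
      by_cases hws : pvIsWs ch
      · cases iw <;>
          simp [pvLoopA, pvCountB, hlt, hge, hws, Nat.one_add, List.take_succ_cons, pvSumB, ih]
      · simp [pvLoopA, pvCountB, hlt, hge, hws, Nat.one_add, List.take_succ_cons, pvSumB, ih]
    · have hge : cp ≥ offset := by omega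
      simp [pvLoopA, pvCountB, hlt, hge, pvSumB]

-- ===== VERDICT (by name: the statement is the Claim_ definition above) =====
theorem collapsed_to_html_offset_py_spec : Claim_equal_collapsed_to_html_offset_py := by
  intro html decoded offset _
  unfold Spec_collapsed_to_html_offset_py collapsed_to_html_offset_py collapsed_to_html_offset_py_alt
  by_cases h0 : offset = 0
  · simp [h0]
  · simp [h0, pvLoopA_eq]
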